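-- pv_equiv track=rewrite | github.com/liderako/Piscine-django | day01/ex05/all_in.py | convert
-- ===== SOURCE A (Python) =====
-- def     convert(listS):
--     result = listS
--     i = 0
--     for x in result:
--         result[i] = x.capitalize()
--         tmp = result[i].split(" ")
--         if (len(tmp) == 2):
--             tmp[1] = tmp[1].capitalize()
--             result[i] = tmp[0] + " " + tmp[1]
--         i += 1
--     for x in result:
--         try:
--             result.remove('')
--         except:
--             pass
--     return (result)
-- ===== SOURCE B (Python) =====
-- def convert(listS):
--     result = []
--     for x in listS:
--         c = x.capitalize()
--         parts = c.split(" ")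
--         if len(parts) == 2:
--             c = parts[0] + " " + parts[1].capitalize()
--         if c:
--             result.append(c)
--     return result
-- ===== Notes on version B (the rewrite author's own statement) =====
-- stated objective: faster
-- what changed: B is a single linear pass that capitalizes each string and keeps it only if nonempty, replacing A's in-place index loop plus quadratic for-loop of list.remove('') calls.
-- intended difference: On lists where more than ceil(n/2) of the n elements are empty strings, A's mutate-during-iterate removal loop stops early and leaves some '' entries in the result, while B removes all of them, which is the evident intent of the removal loop. — e.g. on convert(["", "", ""]): A returns [""], B returns []
import Mathlib
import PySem

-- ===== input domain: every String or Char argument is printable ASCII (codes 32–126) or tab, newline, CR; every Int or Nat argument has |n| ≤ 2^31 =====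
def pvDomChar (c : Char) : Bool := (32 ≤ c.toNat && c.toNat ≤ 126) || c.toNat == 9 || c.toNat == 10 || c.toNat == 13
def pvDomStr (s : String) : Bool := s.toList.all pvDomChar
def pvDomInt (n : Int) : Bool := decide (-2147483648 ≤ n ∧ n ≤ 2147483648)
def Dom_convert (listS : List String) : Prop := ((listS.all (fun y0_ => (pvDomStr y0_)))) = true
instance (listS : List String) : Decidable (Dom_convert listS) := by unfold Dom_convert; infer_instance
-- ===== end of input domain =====

-- B is a single linear pass (capitalize, keep if nonempty) replacing A's in-place index loop
-- plus quadratic remove('') loop (objective: faster). A mutates listS in place, B does not;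
-- the equivalence proved here is about the return value.

-- ===== PORT A =====
-- hand-port of Python str.capitalize() (not in PySem); exact on the ASCII domain:
-- first character uppercased, the rest lowercased.
def pyCapitalize (s : String) : String :=
  match s.toList with
  | [] => ""
  | c :: rest => String.ofList (PySem.Chars.upperChar c :: PySem.Chars.lower rest)

-- `try: result.remove('') except: pass` — remove first '' if present, else no-op
def pyRemoveEmpty (l : List String) : List String :=
  (PySem.List.remove? l "").getD l

-- needed by convertLoop2's termination proof (cited in decreasing_by)
theorem length_pyRemoveEmpty_le (l : List String) : (pyRemoveEmpty l).length ≤ l.length := by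
  unfold pyRemoveEmpty
  by_cases h : "" ∈ l
  · rw [PySem.List.remove?_eq_some_erase l "" h]
    simp [List.length_erase_of_mem h]
  · rw [(PySem.List.remove?_eq_none_iff l "").mpr h]
    simp

-- A's second loop: `for x in result: try result.remove('') except pass` — the iterator
-- index t advances by 1 each iteration while the list may shrink; loop runs while t < len.
def convertLoop2 (l : List String) (t : Nat) : List String :=
  if t < l.length then convertLoop2 (pyRemoveEmpty l) (t + 1) else l
termination_by l.length - t
decreasing_by have := length_pyRemoveEmpty_le l; omega

-- one iteration of A's first loop at index i (i < length always, so the getD default is never used)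
def stepA (l : List String) (i : Nat) : List String :=
  let x := l.getD i ""
  let l1 := l.set i (pyCapitalize x)
  let tmp := (PySem.Str.split? (l1.getD i "") " ").getD []
  if tmp.length = 2 then l1.set i (tmp.getD 0 "" ++ " " ++ pyCapitalize (tmp.getD 1 "")) else l1

def convert (listS : List String) : List String :=
  let result := (List.range listS.length).foldl stepA listS
  convertLoop2 result 0

-- ===== PORT B =====
-- body of B's single pass: capitalize, fix the two-word case
def capB (x : String) : String :=
  let c := pyCapitalize x
  let tmp := (PySem.Str.split? c " ").getD []
  if tmp.length = 2 then tmp.getD 0 "" ++ " " ++ pyCapitalize (tmp.getD 1 "") else c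

def convert_alt (listS : List String) : List String :=
  listS.foldl (fun acc x => let c := capB x; if c ≠ "" then acc ++ [c] else acc) []

-- ===== PRECONDITION & SPEC =====
-- On lists where more than ceil(n/2) of the n elements are empty strings, A's
-- mutate-during-iterate removal loop stops early and leaves some '' entries in the
-- result, while B removes all of them — the evident intent of the removal loop.
def D_convert (listS : List String) : Prop := listS.length + 1 < 2 * listS.count ""
instance (listS : List String) : Decidable (D_convert listS) := by unfold D_convert; infer_instance

def Spec_convert (listS : List String) (out : List String) : Prop := ¬ D_convert listS → out = convert_alt listS
instance (listS : List String) (out : List String) : Decidable (Spec_convert listS out) := by unfold Spec_convert; infer_instance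

def pvDiffWitness_convert : List String := ["", "", ""]
def pvDiffWitnessOut_convert : (List String) × (List String) := ([""], [])

-- ===== CLAIM (what is proved, stated in full; the proofs are below) =====
def Claim_unchanged_convert : Prop := ∀ (listS : List String), Dom_convert listS → Spec_convert listS (convert listS)
def Claim_changed_convert : Prop := Dom_convert (pvDiffWitness_convert) ∧ D_convert (pvDiffWitness_convert) ∧ convert (pvDiffWitness_convert) = pvDiffWitnessOut_convert.1 ∧ convert_alt (pvDiffWitness_convert) = pvDiffWitnessOut_convert.2 ∧ pvDiffWitnessOut_convert.1 ≠ pvDiffWitnessOut_convert.2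
def Claim_exact_convert : Prop := ∀ (listS : List String), Dom_convert listS → D_convert listS → convert listS ≠ convert_alt listS

-- ===== LEMMAS AND PROOFS =====

-- one step of A's first loop at the current index rewrites exactly one element by capB
theorem stepA_spec (M : List String) (x : String) (B : List String) :
    stepA (M ++ x :: B) M.length = M ++ capB x :: B := by
  have hget : (M ++ x :: B).getD M.length "" = x := by
    simp [List.getD]
  have hset : ∀ v : String, (M ++ x :: B).set M.length v = M ++ v :: B := by
    intro v
    rw [List.set_append_right _ _ (le_refl M.length)]
    simp
  have hget1 : (M ++ pyCapitalize x :: B).getD M.length "" = pyCapitalize x := by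
    simp [List.getD]
  have hset1 : ∀ v : String, (M ++ pyCapitalize x :: B).set M.length v = M ++ v :: B := by
    intro v
    rw [List.set_append_right _ _ (le_refl M.length)]
    simp
  simp only [stepA, capB, hget, hset, hget1, hset1]
  split <;> rfl

-- A's first loop maps capB over the not-yet-visited suffix
theorem foldl_stepA (B : List String) : ∀ (M : List String),
    (List.range' M.length B.length).foldl stepA (M ++ B) = M ++ B.map capB := by
  induction B with
  | nil => intro M; simp
  | cons x B' ih =>
    intro M
    have : List.range' M.length (x :: B').length = M.length :: List.range' (M.length + 1) B'.length := by
      simp [List.range']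
    rw [this]
    simp only [List.foldl_cons, stepA_spec]
    have h1 : M ++ capB x :: B' = (M ++ [capB x]) ++ B' := by simp
    have h2 : M.length + 1 = (M ++ [capB x]).length := by simp
    rw [h1, h2, ih (M ++ [capB x])]
    simp

theorem firstLoop_eq_map (listS : List String) :
    (List.range listS.length).foldl stepA listS = listS.map capB := by
  have := foldl_stepA listS []
  simpa [List.range_eq_range'] using this

-- m successive applications of pyRemoveEmpty
def iterRemove : Nat → List String → List String
  | 0, l => l
  | m + 1, l => iterRemove m (pyRemoveEmpty l)

theorem pyRemoveEmpty_of_mem {l : List String} (h : "" ∈ l) :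
    pyRemoveEmpty l = l.erase "" := by
  unfold pyRemoveEmpty; rw [PySem.List.remove?_eq_some_erase l "" h]; rfl

theorem pyRemoveEmpty_of_not_mem {l : List String} (h : "" ∉ l) :
    pyRemoveEmpty l = l := by
  unfold pyRemoveEmpty; rw [(PySem.List.remove?_eq_none_iff l "").mpr h]; rfl

-- characterisation of A's second loop: from index t it performs
-- min(count '', ceil((len - t)/2)) removals
theorem convertLoop2_eq (fuel : Nat) : ∀ (l : List String) (t : Nat), l.length - t ≤ fuel →
    convertLoop2 l t = iterRemove (min (l.count "") ((l.length - t + 1) / 2)) l := by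
  induction fuel with
  | zero =>
    intro l t h
    have ht : l.length ≤ t := by omega
    rw [convertLoop2]
    have : ¬ t < l.length := by omega
    simp only [this, if_false]
    have : l.length - t = 0 := by omega
    simp [this, iterRemove]
  | succ f ih =>
    intro l t h
    rw [convertLoop2]
    by_cases ht : t < l.length
    · simp only [ht, if_true]
      by_cases hm : "" ∈ l
      · have hk : 1 ≤ l.count "" := List.count_pos_iff.mpr hm
        rw [pyRemoveEmpty_of_mem hm]
        have hlen : (l.erase "").length = l.length - 1 := List.length_erase_of_mem hm
        have hcnt : (l.erase "").count "" = l.count "" - 1 := by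
          simp [List.count_erase_self]
        rw [ih (l.erase "") (t + 1) (by omega)]
        rw [hlen, hcnt]
        have hpos : 1 ≤ min (l.count "") ((l.length - t + 1) / 2) := by omega
        obtain ⟨m', hm'⟩ : ∃ m', min (l.count "") ((l.length - t + 1) / 2) = m' + 1 :=
          ⟨_, (Nat.succ_pred_eq_of_pos hpos).symm⟩
        rw [hm', iterRemove, pyRemoveEmpty_of_mem hm]
        congr 1
        omega
      · have hk : l.count "" = 0 := by
          simp [List.count_eq_zero]; exact hm
        rw [pyRemoveEmpty_of_not_mem hm, ih l (t + 1) (by omega)]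
        simp [hk, iterRemove]
    · simp only [ht, if_false]
      have : l.length - t = 0 := by omega
      simp [this, iterRemove]

-- capB sends exactly "" to ""
theorem capB_eq_empty_iff (x : String) : capB x = "" ↔ x = "" := by
  constructor
  · intro h
    by_contra hx
    obtain ⟨c, rest, hcl⟩ : ∃ c rest, x.toList = c :: rest := by
      cases hxl : x.toList with
      | nil =>
        exact absurd (String.toList_inj.mp (by simp [hxl])) hx
      | cons c rest => exact ⟨c, rest, rfl⟩
    have hcap : pyCapitalize x = String.ofList (PySem.Chars.upperChar c :: PySem.Chars.lower rest) := by
      unfold pyCapitalize; rw [hcl]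
    simp only [capB, hcap] at h
    split at h
    · have hl := congrArg String.length h
      simp [String.length_append] at hl
    · have := congrArg String.toList h
      simp at this
  · intro h; subst h; decide

theorem count_map_capB (l : List String) : (l.map capB).count "" = l.count "" := by
  induction l with
  | nil => rfl
  | cons x rest ih =>
    simp only [List.map_cons, List.count_cons, ih]
    congr 1
    by_cases hx : x = ""
    · subst hx; simp [capB_eq_empty_iff]
    · simp [hx, (capB_eq_empty_iff x).not.mpr hx]

-- removing count('') empties is exactly filtering them out
theorem iterRemove_count_eq_filter (l : List String) :
    iterRemove (l.count "") l = l.filter (fun s => !(s == "")) := by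
  induction l with
  | nil => rfl
  | cons s rest ih =>
    by_cases hs : s = ""
    · subst hs
      have hc : (("" : String) :: rest).count "" = rest.count "" + 1 := by
        simp [List.count_cons]
      rw [hc, iterRemove, pyRemoveEmpty_of_mem (by simp), List.erase_cons_head, ih]
      simp
    · have hc : (s :: rest).count "" = rest.count "" := by
        simp [List.count_cons, hs]
      rw [hc, iterRemove_cons_ne s hs _ rest le_rfl, ih]
      simp [hs]
where
  iterRemove_cons_ne (s : String) (hs : s ≠ "") : ∀ (m : Nat) (rest : List String),
      m ≤ rest.count "" → iterRemove m (s :: rest) = s :: iterRemove m rest := by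
    intro m
    induction m with
    | zero => intro rest _; simp [iterRemove]
    | succ m' ih =>
      intro rest hle
      have hmem : "" ∈ rest := by
        by_contra hn
        have : rest.count "" = 0 := by simp [List.count_eq_zero]; exact hn
        omega
      have h1 : pyRemoveEmpty (s :: rest) = s :: pyRemoveEmpty rest := by
        rw [pyRemoveEmpty_of_mem (by simp [hmem]), pyRemoveEmpty_of_mem hmem,
          List.erase_cons_tail]
        simp [hs]
      rw [iterRemove, h1, ih (pyRemoveEmpty rest)
        (by rw [pyRemoveEmpty_of_mem hmem]; simp [List.count_erase_self]; omega)]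
      have h2 : iterRemove m' (pyRemoveEmpty rest) = iterRemove (m' + 1) rest := rfl
      rw [h2]

-- B's fold builds the filtered map
theorem foldl_bodyB (l : List String) : ∀ (acc : List String),
    l.foldl (fun acc x => let c := capB x; if c ≠ "" then acc ++ [c] else acc) acc
      = acc ++ (l.map capB).filter (fun s => !(s == "")) := by
  induction l with
  | nil => intro acc; simp
  | cons x rest ih =>
    intro acc
    rw [List.foldl_cons, ih]
    by_cases h : capB x = ""
    · simp [h]
    · simp [h]

theorem length_iterRemove : ∀ (m : Nat) (l : List String), m ≤ l.count "" →
    (iterRemove m l).length = l.length - m := by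
  intro m
  induction m with
  | zero => intro l _; simp [iterRemove]
  | succ m' ih =>
    intro l hle
    have hmem : "" ∈ l := by
      by_contra hn
      have : l.count "" = 0 := by simp [List.count_eq_zero]; exact hn
      omega
    rw [iterRemove, pyRemoveEmpty_of_mem hmem,
      ih _ (by simp [List.count_erase_self]; omega),
      List.length_erase_of_mem hmem]
    have := List.count_pos_iff.mpr hmem
    have := List.length_pos_of_mem hmem
    omega

theorem length_filter_ne (l : List String) :
    (l.filter (fun s => !(s == ""))).length = l.length - l.count "" := by
  induction l with
  | nil => rfl
  | cons s rest ih =>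
    have hc := List.count_le_length (l := rest) (a := ("" : String))
    by_cases hs : s = ""
    · subst hs; simp [List.count_cons, ih]
    · simp [List.filter_cons, hs, ih]
      omega

-- ===== VERDICT (by name: the statements are the Claim_ definitions above) =====
theorem convert_spec : Claim_unchanged_convert := by
  intro listS _ hD
  unfold convert convert_alt
  rw [firstLoop_eq_map]
  set out := listS.map capB with hout
  have hlen : out.length = listS.length := by rw [hout]; simp
  have hcnt : out.count "" = listS.count "" := by rw [hout]; exact count_map_capB listS
  rw [convertLoop2_eq (out.length) out 0 (by omega)]
  unfold D_convert at hD
  have hmin : min (out.count "") ((out.length - 0 + 1) / 2) = out.count "" := by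
    have hc := List.count_le_length (l := listS) (a := ("" : String))
    omega
  rw [hmin, iterRemove_count_eq_filter, foldl_bodyB]
  rw [hout]
  simp

theorem convert_witness_val : convert pvDiffWitness_convert = pvDiffWitnessOut_convert.1 := by
  show convertLoop2 ((List.range (["", "", ""] : List String).length).foldl stepA ["", "", ""]) 0 = [""]
  rw [firstLoop_eq_map, convertLoop2_eq 3 _ 0 (by decide)]
  decide

theorem convert_changed : Claim_changed_convert := by
  unfold Claim_changed_convert
  exact ⟨by decide, by decide, convert_witness_val, by decide, by decide⟩

theorem convert_tight : Claim_exact_convert := by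
  intro listS _ hD heq
  unfold convert convert_alt at heq
  rw [firstLoop_eq_map] at heq
  set out := listS.map capB with hout
  have hlen : out.length = listS.length := by rw [hout]; simp
  have hcnt : out.count "" = listS.count "" := by rw [hout]; exact count_map_capB listS
  have hc := List.count_le_length (l := listS) (a := ("" : String))
  unfold D_convert at hD
  rw [convertLoop2_eq (out.length) out 0 (by omega), foldl_bodyB] at heq
  have hmin : min (out.count "") ((out.length - 0 + 1) / 2) = (out.length + 1) / 2 := by
    omega
  rw [hmin] at heq
  have h1 := congrArg List.length heq
  rw [length_iterRemove _ _ (by omega)] at h1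
  simp only [List.nil_append] at h1
  rw [length_filter_ne, ← hout] at h1
  omega
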